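-- pv_equiv track=rewrite | github.com/kunlubrain/legacy | coocur/coword/histsize.py | histsize_4d
-- ===== SOURCE A (Python) =====
-- def histsize_4d(ctf):
--     len1, len2, len3, len4 = 0, 0, 0, 0
--     for t in ctf:
--         len1+=1
--         for tt in ctf[t]:
--             len2+=1
--             for ttt in ctf[t][tt]:
--                 len3+=1
--                 len4+=len(ctf[t][tt][ttt])
--     return '%d : %d : %d : %d'%(len1, len2, len3, len4)
-- ===== SOURCE B (Python) =====
-- def histsize_4d(ctf):
--     counts = [0, 0, 0, 0]
--
--     def walk(node, depth):
--         counts[depth] += len(node)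
--         if depth < 3:
--             for child in node.values():
--                 walk(child, depth + 1)
--
--     walk(ctf, 0)
--     return '%d : %d : %d : %d' % tuple(counts)
-- ===== Notes on version B (the rewrite author's own statement) =====
-- stated objective: alternative
-- what changed: Replaced the fused triple-nested key-loop with repeated key subscripts (ctf[t][tt][ttt]) by a single depth-indexed recursive tree walker over .values() that accumulates one counter per level in a counts array; Pre_ only excludes association lists with duplicate keys, which represent no Python dict.
import Mathlib
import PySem

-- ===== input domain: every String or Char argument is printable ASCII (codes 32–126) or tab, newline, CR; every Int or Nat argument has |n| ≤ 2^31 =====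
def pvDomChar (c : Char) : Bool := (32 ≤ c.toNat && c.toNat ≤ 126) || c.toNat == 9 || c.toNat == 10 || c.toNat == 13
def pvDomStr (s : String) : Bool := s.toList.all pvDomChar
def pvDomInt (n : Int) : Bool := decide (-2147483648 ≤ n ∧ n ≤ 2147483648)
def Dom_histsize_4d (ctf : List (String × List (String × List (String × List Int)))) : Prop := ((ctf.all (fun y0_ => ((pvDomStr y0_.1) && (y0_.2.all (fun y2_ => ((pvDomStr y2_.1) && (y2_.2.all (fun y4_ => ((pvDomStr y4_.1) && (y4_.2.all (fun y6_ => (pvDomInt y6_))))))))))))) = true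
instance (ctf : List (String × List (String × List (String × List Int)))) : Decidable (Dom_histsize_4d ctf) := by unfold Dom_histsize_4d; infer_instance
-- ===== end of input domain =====

-- B replaces A's fused triple-nested key-iteration-plus-subscript loop by a depth-indexed
-- recursive tree walker over the stored values with a per-level counter array (objective: alternative).

-- ===== PORT A =====
-- Python iterates dict keys ('for t in ctf') and re-looks each key up ('ctf[t]');
-- in the association-list model the lookup is the FIRST match (List.lookup), exact for
-- dict inputs; '.getD []' is unreachable since each key comes from the list itself.
def histsize_4d (ctf : List (String × List (String × List (String × List Int)))) : String :=
  let st : Int × Int × Int × Int :=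
    ctf.foldl (fun s p =>
      let s : Int × Int × Int × Int := (s.1 + 1, s.2.1, s.2.2.1, s.2.2.2)
      let d1 := (List.lookup p.1 ctf).getD []
      d1.foldl (fun s q =>
        let s : Int × Int × Int × Int := (s.1, s.2.1 + 1, s.2.2.1, s.2.2.2)
        let d2 := (List.lookup q.1 d1).getD []
        d2.foldl (fun s r =>
          (s.1, s.2.1, s.2.2.1 + 1,
           s.2.2.2 + (((List.lookup r.1 d2).getD []).length : Int))) s) s)
      (0, 0, 0, 0)
  PySem.Int.toStr st.1 ++ " : " ++ PySem.Int.toStr st.2.1 ++ " : " ++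
    PySem.Int.toStr st.2.2.1 ++ " : " ++ PySem.Int.toStr st.2.2.2

-- ===== PORT B =====
-- Source B's single recursive 'walk(node, depth)' dispatches on depth; since the node type
-- changes with the depth, the port writes one walker per depth value, each a literal
-- transcription of the corresponding unfolding of walk (counts[depth] += len(node);
-- recurse into node.values() unless depth == 3). counts is threaded as a 4-tuple.
def pvWalk3 (node : List Int) (c : Int × Int × Int × Int) : Int × Int × Int × Int :=
  (c.1, c.2.1, c.2.2.1, c.2.2.2 + (node.length : Int))

def pvWalk2 (node : List (String × List Int)) (c : Int × Int × Int × Int) :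
    Int × Int × Int × Int :=
  node.foldl (fun c q => pvWalk3 q.2 c) (c.1, c.2.1, c.2.2.1 + (node.length : Int), c.2.2.2)

def pvWalk1 (node : List (String × List (String × List Int))) (c : Int × Int × Int × Int) :
    Int × Int × Int × Int :=
  node.foldl (fun c q => pvWalk2 q.2 c) (c.1, c.2.1 + (node.length : Int), c.2.2.1, c.2.2.2)

def pvWalk0 (node : List (String × List (String × List (String × List Int))))
    (c : Int × Int × Int × Int) : Int × Int × Int × Int :=
  node.foldl (fun c p => pvWalk1 p.2 c) (c.1 + (node.length : Int), c.2.1, c.2.2.1, c.2.2.2)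

def histsize_4d_alt (ctf : List (String × List (String × List (String × List Int)))) : String :=
  let c := pvWalk0 ctf (0, 0, 0, 0)
  PySem.Int.toStr c.1 ++ " : " ++ PySem.Int.toStr c.2.1 ++ " : " ++
    PySem.Int.toStr c.2.2.1 ++ " : " ++ PySem.Int.toStr c.2.2.2

-- ===== PRECONDITION & SPEC =====
-- Pre_ excludes association lists with duplicate keys at some dict level: such lists do
-- not represent any Python dict (dict construction collapses duplicates), and there A's
-- first-match re-lookup and B's direct value traversal are both accidental behaviours.
def Pre_histsize_4d (ctf : List (String × List (String × List (String × List Int)))) : Prop :=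
  (ctf.map Prod.fst).Nodup ∧
    ∀ p ∈ ctf, (p.2.map Prod.fst).Nodup ∧ ∀ q ∈ p.2, (q.2.map Prod.fst).Nodup
instance (ctf : List (String × List (String × List (String × List Int)))) : Decidable (Pre_histsize_4d ctf) := by unfold Pre_histsize_4d; infer_instance

def pvWitness_histsize_4d : (List (String × List (String × List (String × List Int)))) :=
  [("a", [("x", [("y", [1, 2]), ("z", [])]), ("w", [])]), ("b", [])]

def Spec_histsize_4d (ctf : List (String × List (String × List (String × List Int)))) (out : String) : Prop := out = histsize_4d_alt ctf
instance (ctf : List (String × List (String × List (String × List Int)))) (out : String) : Decidable (Spec_histsize_4d ctf out) := by unfold Spec_histsize_4d; infer_instance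

-- ===== CLAIM (what is proved, stated in full; the proofs are below) =====
def Claim_equal_histsize_4d : Prop := ∀ (ctf : List (String × List (String × List (String × List Int)))), Dom_histsize_4d ctf → Pre_histsize_4d ctf → Spec_histsize_4d ctf (histsize_4d ctf)

-- ===== LEMMAS AND PROOFS =====

-- With nodup keys, looking up an entry's own key returns that entry's value.
theorem pv_lookup_mem_self {α : Type} (d : List (String × α)) (h : (d.map Prod.fst).Nodup)
    {p : String × α} (hp : p ∈ d) : List.lookup p.1 d = some p.2 := by
  induction d with
  | nil => cases hp
  | cons q t ih =>
    simp only [List.map_cons, List.nodup_cons] at h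
    rcases List.mem_cons.mp hp with rfl | hpt
    · simp [List.lookup]
    · have hne : p.1 ≠ q.1 := by
        intro he
        exact h.1 (he ▸ List.mem_map_of_mem hpt)
      simp [List.lookup, beq_eq_false_iff_ne.mpr hne, ih h.2 hpt]

-- Innermost loop of A: over a list whose entries look themselves up correctly in d2.
theorem pv_fold3 (d2 : List (String × List Int)) (l : List (String × List Int))
    (h : ∀ r ∈ l, List.lookup r.1 d2 = some r.2) (s : Int × Int × Int × Int) :
    l.foldl (fun s r =>
      (s.1, s.2.1, s.2.2.1 + 1, s.2.2.2 + (((List.lookup r.1 d2).getD []).length : Int))) s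
    = (s.1, s.2.1, s.2.2.1 + l.length,
       s.2.2.2 + (l.map (fun r => (r.2.length : Int))).sum) := by
  induction l generalizing s with
  | nil => simp
  | cons r t ih =>
    simp only [List.foldl_cons, h r (List.mem_cons_self), Option.getD_some]
    rw [ih (fun x hx => h x (List.mem_cons_of_mem _ hx))]
    simp only [List.length_cons, List.map_cons, List.sum_cons, Prod.mk.injEq]
    push_cast
    and_intros <;> first | trivial | ring

-- Middle loop of A.
theorem pv_fold2 (d1 : List (String × List (String × List Int)))
    (l : List (String × List (String × List Int)))
    (h : ∀ q ∈ l, List.lookup q.1 d1 = some q.2)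
    (hn : ∀ q ∈ l, (q.2.map Prod.fst).Nodup) (s : Int × Int × Int × Int) :
    l.foldl (fun s q =>
      let s : Int × Int × Int × Int := (s.1, s.2.1 + 1, s.2.2.1, s.2.2.2)
      let d2 := (List.lookup q.1 d1).getD []
      d2.foldl (fun s r =>
        (s.1, s.2.1, s.2.2.1 + 1, s.2.2.2 + (((List.lookup r.1 d2).getD []).length : Int))) s) s
    = (s.1, s.2.1 + l.length,
       s.2.2.1 + ((l.flatMap (fun q => q.2)).length : Int),
       s.2.2.2 + ((l.flatMap (fun q => q.2)).map (fun r => (r.2.length : Int))).sum) := by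
  induction l generalizing s with
  | nil => simp
  | cons q t ih =>
    simp only [List.foldl_cons, h q (List.mem_cons_self), Option.getD_some]
    rw [pv_fold3 q.2 q.2
        (fun r hr => pv_lookup_mem_self q.2 (hn q (List.mem_cons_self)) hr)]
    rw [ih (fun x hx => h x (List.mem_cons_of_mem _ hx))
        (fun x hx => hn x (List.mem_cons_of_mem _ hx))]
    simp only [List.flatMap_cons, List.length_append, List.map_append, List.sum_append,
      List.length_cons, Prod.mk.injEq]
    push_cast
    and_intros <;> first | trivial | ring

-- Outer loop of A.
theorem pv_fold1 (ctf : List (String × List (String × List (String × List Int))))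
    (l : List (String × List (String × List (String × List Int))))
    (h : ∀ p ∈ l, List.lookup p.1 ctf = some p.2)
    (hn : ∀ p ∈ l, (p.2.map Prod.fst).Nodup ∧ ∀ q ∈ p.2, (q.2.map Prod.fst).Nodup)
    (s : Int × Int × Int × Int) :
    l.foldl (fun s p =>
      let s : Int × Int × Int × Int := (s.1 + 1, s.2.1, s.2.2.1, s.2.2.2)
      let d1 := (List.lookup p.1 ctf).getD []
      d1.foldl (fun s q =>
        let s : Int × Int × Int × Int := (s.1, s.2.1 + 1, s.2.2.1, s.2.2.2)
        let d2 := (List.lookup q.1 d1).getD []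
        d2.foldl (fun s r =>
          (s.1, s.2.1, s.2.2.1 + 1,
           s.2.2.2 + (((List.lookup r.1 d2).getD []).length : Int))) s) s) s
    = (s.1 + l.length,
       s.2.1 + ((l.flatMap (fun p => p.2)).length : Int),
       s.2.2.1 + (((l.flatMap (fun p => p.2)).flatMap (fun q => q.2)).length : Int),
       s.2.2.2 + (((l.flatMap (fun p => p.2)).flatMap (fun q => q.2)).map
          (fun r => (r.2.length : Int))).sum) := by
  induction l generalizing s with
  | nil => simp
  | cons p t ih =>
    simp only [List.foldl_cons, h p (List.mem_cons_self), Option.getD_some]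
    rw [pv_fold2 p.2 p.2
        (fun q hq => pv_lookup_mem_self p.2 (hn p (List.mem_cons_self)).1 hq)
        (fun q hq => (hn p (List.mem_cons_self)).2 q hq)]
    rw [ih (fun x hx => h x (List.mem_cons_of_mem _ hx))
        (fun x hx => hn x (List.mem_cons_of_mem _ hx))]
    simp only [List.flatMap_cons, List.flatMap_append, List.length_append, List.map_append,
      List.sum_append, List.length_cons, Prod.mk.injEq]
    push_cast
    and_intros <;> first | trivial | ring

-- Folds of B's walkers over a general start state, then the walkers' closed forms.
theorem pv_bfold3 (t : List (String × List Int)) (s : Int × Int × Int × Int) :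
    t.foldl (fun c q => pvWalk3 q.2 c) s
    = (s.1, s.2.1, s.2.2.1, s.2.2.2 + (t.map (fun r => (r.2.length : Int))).sum) := by
  induction t generalizing s with
  | nil => simp
  | cons r t ih =>
    rw [List.foldl_cons, ih]
    simp only [pvWalk3, List.map_cons, List.sum_cons, Prod.mk.injEq]
    and_intros <;> first | trivial | ring

theorem pv_walk2_eq (d : List (String × List Int)) (s : Int × Int × Int × Int) :
    pvWalk2 d s = (s.1, s.2.1, s.2.2.1 + d.length,
      s.2.2.2 + (d.map (fun r => (r.2.length : Int))).sum) := by
  unfold pvWalk2; rw [pv_bfold3]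

theorem pv_bfold2 (t : List (String × List (String × List Int))) (s : Int × Int × Int × Int) :
    t.foldl (fun c q => pvWalk2 q.2 c) s
    = (s.1, s.2.1, s.2.2.1 + ((t.flatMap (fun q => q.2)).length : Int),
       s.2.2.2 + ((t.flatMap (fun q => q.2)).map (fun r => (r.2.length : Int))).sum) := by
  induction t generalizing s with
  | nil => simp
  | cons q t ih =>
    rw [List.foldl_cons, ih]
    simp only [pv_walk2_eq, List.flatMap_cons, List.length_append,
      List.map_append, List.sum_append, Prod.mk.injEq]
    push_cast
    and_intros <;> first | trivial | ring

theorem pv_walk1_eq (d : List (String × List (String × List Int))) (s : Int × Int × Int × Int) :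
    pvWalk1 d s = (s.1, s.2.1 + d.length,
      s.2.2.1 + ((d.flatMap (fun q => q.2)).length : Int),
      s.2.2.2 + ((d.flatMap (fun q => q.2)).map (fun r => (r.2.length : Int))).sum) := by
  unfold pvWalk1; rw [pv_bfold2]

theorem pv_bfold1 (t : List (String × List (String × List (String × List Int))))
    (s : Int × Int × Int × Int) :
    t.foldl (fun c p => pvWalk1 p.2 c) s
    = (s.1, s.2.1 + ((t.flatMap (fun p => p.2)).length : Int),
       s.2.2.1 + (((t.flatMap (fun p => p.2)).flatMap (fun q => q.2)).length : Int),
       s.2.2.2 + (((t.flatMap (fun p => p.2)).flatMap (fun q => q.2)).map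
          (fun r => (r.2.length : Int))).sum) := by
  induction t generalizing s with
  | nil => simp
  | cons p t ih =>
    rw [List.foldl_cons, ih]
    simp only [pv_walk1_eq, List.flatMap_cons, List.flatMap_append,
      List.length_append, List.map_append, List.sum_append, Prod.mk.injEq]
    push_cast
    and_intros <;> first | trivial | ring

theorem pv_walk0_eq (d : List (String × List (String × List (String × List Int)))) :
    pvWalk0 d (0, 0, 0, 0) = ((d.length : Int),
      ((d.flatMap (fun p => p.2)).length : Int),
      (((d.flatMap (fun p => p.2)).flatMap (fun q => q.2)).length : Int),
      (((d.flatMap (fun p => p.2)).flatMap (fun q => q.2)).map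
        (fun r => (r.2.length : Int))).sum) := by
  unfold pvWalk0; rw [pv_bfold1]; simp

-- ===== VERDICT (by name: the statement is the Claim_ definition above) =====
theorem histsize_4d_spec : Claim_equal_histsize_4d := by
  intro ctf _hdom hpre
  unfold Spec_histsize_4d histsize_4d histsize_4d_alt
  rw [pv_fold1 ctf ctf (fun p hp => pv_lookup_mem_self ctf hpre.1 hp) hpre.2,
    pv_walk0_eq]
  simp
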